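-- pv_equiv track=rewrite | github.com/andenwick/proxy-staff | tenants/_template/execution/docs_format.py | ranges_from_match
-- ===== SOURCE A (Python) =====
-- def find_matches(text, needle, match_all=False):
--     matches = []
--     if not needle:
--         return matches
--     start = 0
--     while True:
--         idx = text.find(needle, start)
--         if idx == -1:
--             break
--         matches.append(idx)
--         if not match_all:
--             break
--         start = idx + len(needle)
--     return matches
--
-- def ranges_from_match(text, index_map, needle, match_all=False):
--     results = []
--     for idx in find_matches(text, needle, match_all=match_all):
--         end_offset = idx + len(needle) - 1
--         if end_offset >= len(index_map):
--             continue
--         start_index = index_map[idx]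
--         end_index = index_map[end_offset] + 1
--         results.append({"startIndex": start_index, "endIndex": end_index})
--     return results
-- ===== SOURCE B (Python) =====
-- def ranges_from_match(text, index_map, needle, match_all=False):
--     # Staged pipeline: enumerate every (possibly overlapping) occurrence start,
--     # then greedily keep non-overlapping ones, then map to ranges.
--     if not needle:
--         return []
--     n = len(needle)
--     candidates = [i for i in range(len(text) - n + 1) if text[i:i + n] == needle]
--     picked = []
--     bound = 0
--     for i in candidates:
--         if i >= bound:
--             picked.append(i)
--             bound = i + n
--             if not match_all:
--                 break
--     return [{"startIndex": index_map[i], "endIndex": index_map[i + n - 1] + 1}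
--             for i in picked if i + n - 1 < len(index_map)]
-- ===== Notes on version B (the rewrite author's own statement) =====
-- stated objective: alternative
-- what changed: Replaces A's stateful while/str.find search-and-build loop with a three-stage pipeline: a comprehension enumerating every (possibly overlapping) occurrence start by slice comparison, a greedy pass keeping non-overlapping starts, and a comprehension mapping the kept starts to ranges.
import Mathlib
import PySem

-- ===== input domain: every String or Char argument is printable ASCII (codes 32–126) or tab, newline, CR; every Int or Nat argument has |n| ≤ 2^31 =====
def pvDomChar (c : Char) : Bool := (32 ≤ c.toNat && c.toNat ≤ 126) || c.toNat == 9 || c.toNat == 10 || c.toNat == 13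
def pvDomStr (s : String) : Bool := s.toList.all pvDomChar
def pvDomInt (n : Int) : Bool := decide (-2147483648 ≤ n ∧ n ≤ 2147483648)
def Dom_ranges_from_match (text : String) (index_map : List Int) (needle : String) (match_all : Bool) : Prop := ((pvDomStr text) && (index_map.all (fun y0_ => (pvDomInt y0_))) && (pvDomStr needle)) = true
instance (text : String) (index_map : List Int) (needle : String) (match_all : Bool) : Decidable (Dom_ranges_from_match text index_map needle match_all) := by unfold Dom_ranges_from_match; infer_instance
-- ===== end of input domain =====

-- ===== PORT A =====
-- B rebuilds the same ranges as a staged pipeline (enumerate all occurrence starts by slice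
-- comparison, greedily keep non-overlapping ones, map to ranges) instead of A's while/find loop
-- (alternative decomposition, same asymptotic cost).

-- 'while True: idx = text.find(needle, start); ...' — fuel-bounded transliteration of A's while
-- loop (each iteration moves start past a nonempty match, so fuel = len(text)+1 never runs out)
def rfmFindLoop (text needle : String) (match_all : Bool) : Nat → Int → List Int → List Int
  | 0, _, acc => acc
  | fuel+1, start, acc =>
    let idx := PySem.Str.findFrom text needle start
    if idx = -1 then acc
    else if match_all then rfmFindLoop text needle match_all fuel (idx + (PySem.Str.len needle : Int)) (acc ++ [idx])
    else acc ++ [idx]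

-- def find_matches(text, needle, match_all=False)
def find_matches (text : String) (needle : String) (match_all : Bool) : List Int :=
  if needle = "" then []
  else rfmFindLoop text needle match_all (text.toList.length + 1) 0 []

def ranges_from_match (text : String) (index_map : List Int) (needle : String) (match_all : Bool) : List (List (String × Int)) :=
  (find_matches text needle match_all).foldl (fun results idx =>
    let end_offset := idx + (PySem.Str.len needle : Int) - 1
    if end_offset ≥ (index_map.length : Int) then results
    else
      -- index_map[idx] / index_map[end_offset]: here 0 ≤ idx ≤ end_offset < len(index_map)
      -- (idx is a match index and needle ≠ ""), so Python never raises; pyGetD is exact in range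
      let start_index := PySem.List.pyGetD index_map idx 0
      let end_index := PySem.List.pyGetD index_map end_offset 0 + 1
      results ++ [[("startIndex", start_index), ("endIndex", end_index)]]) []

-- ===== PORT B =====
-- 'for i in candidates: if i >= bound: picked.append(i); bound = i + n; if not match_all: break'
def rfmPick (match_all : Bool) (n : Nat) : List Int → Int → List Int
  | [], _ => []
  | i :: rest, bound =>
    if i ≥ bound then
      if match_all then i :: rfmPick match_all n rest (i + (n : Int)) else [i]
    else rfmPick match_all n rest bound

def ranges_from_match_alt (text : String) (index_map : List Int) (needle : String) (match_all : Bool) : List (List (String × Int)) :=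
  if needle = "" then []
  else
    let n := needle.toList.length
    -- candidates = [i for i in range(len(text) - n + 1) if text[i:i+n] == needle]
    let candidates := (PySem.List.pyRange 0 ((text.toList.length : Int) - (n : Int) + 1) 1).filter
        (fun i => PySem.List.slice text.toList (some i) (some (i + (n : Int))) == needle.toList)
    let picked := rfmPick match_all n candidates 0
    -- final comprehension: filter by bound, map to the range dict
    picked.filterMap (fun i =>
      if i + (n : Int) - 1 < (index_map.length : Int) then
        some [("startIndex", PySem.List.pyGetD index_map i 0),
              ("endIndex", PySem.List.pyGetD index_map (i + (n : Int) - 1) 0 + 1)]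
      else none)

-- ===== PRECONDITION & SPEC =====
def Spec_ranges_from_match (text : String) (index_map : List Int) (needle : String) (match_all : Bool) (out : List (List (String × Int))) : Prop := out = ranges_from_match_alt text index_map needle match_all
instance (text : String) (index_map : List Int) (needle : String) (match_all : Bool) (out : List (List (String × Int))) : Decidable (Spec_ranges_from_match text index_map needle match_all out) := by unfold Spec_ranges_from_match; infer_instance

-- ===== CLAIM (what is proved, stated in full; the proofs are below) =====
def Claim_equal_ranges_from_match : Prop := ∀ (text : String) (index_map : List Int) (needle : String) (match_all : Bool), Dom_ranges_from_match text index_map needle match_all → Spec_ranges_from_match text index_map needle match_all (ranges_from_match text index_map needle match_all)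

-- ===== LEMMAS AND PROOFS =====

-- canonical greedy occurrence list (proof-side only): leftmost non-overlapping occurrence
-- starts of needle in text from position i on
def rfmScan (text needle : List Char) (i : Nat) : List Nat :=
  if _h : i + needle.length ≤ text.length then
    if needle <+: text.drop i then i :: rfmScan text needle (i + max needle.length 1)
    else rfmScan text needle (i + 1)
  else []
termination_by text.length + 1 - i
decreasing_by all_goals omega

-- candN: the Nat-level candidate list B's first comprehension computes
def candN (text needle : List Char) : List Nat :=
  (List.range (text.length + 1 - needle.length)).filter
    (fun i => (text.drop i).take needle.length == needle)

-- no occurrence of needle at or after position k ⇒ the scan finds nothing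
theorem rfmScan_nil (text needle : List Char) (k : Nat)
    (h : ¬ needle <:+: text.drop k) : rfmScan text needle k = [] := by
  fun_induction rfmScan text needle k with
  | case1 i hle hpre ih =>
    exact absurd (hpre.isInfix) h
  | case2 i hle hpre ih =>
    apply ih
    intro hinf
    exact h (hinf.trans (by simpa [List.drop_drop] using (List.drop_suffix 1 (text.drop i)).isInfix))
  | case3 i hle => rfl

-- an infix of text.drop b is a prefix at some position ≥ b
theorem infix_drop_iff (text needle : List Char) (b : Nat) :
    needle <:+: text.drop b ↔ ∃ i, b ≤ i ∧ needle <+: text.drop i := by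
  constructor
  · intro hinf
    obtain ⟨t, hpre, hsuf⟩ := List.infix_iff_prefix_suffix.mp hinf
    have ht := List.suffix_iff_eq_drop.mp hsuf
    exact ⟨b + ((text.drop b).length - t.length), by omega,
      by rw [← List.drop_drop, ← ht]; exact hpre⟩
  · rintro ⟨i, hbi, hpre⟩
    have : text.drop i = (text.drop b).drop (i - b) := by
      rw [List.drop_drop]; congr 1; omega
    rw [this] at hpre
    exact hpre.isInfix.trans (List.drop_suffix (i - b) (text.drop b)).isInfix

-- j is the first occurrence at or after k ⇒ the scan yields j then continues past the match
theorem rfmScan_first (text needle : List Char) (hne : needle ≠ []) (k j : Nat)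
    (hkj : k ≤ j) (hj : needle <+: text.drop j)
    (hmin : ∀ i, k ≤ i → i < j → ¬ needle <+: text.drop i) :
    rfmScan text needle k = j :: rfmScan text needle (j + needle.length) := by
  have hn : 0 < needle.length := List.length_pos_iff.mpr hne
  have hjlen : j + needle.length ≤ text.length := by
    have := hj.length_le
    simp only [List.length_drop] at this
    omega
  induction hd : j - k generalizing k with
  | zero =>
    have hkj' : k = j := by omega
    subst hkj'
    rw [rfmScan]
    simp only [dif_pos hjlen, if_pos hj]
    have : max needle.length 1 = needle.length := by omega
    rw [this]
  | succ d ih =>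
    rw [rfmScan]
    have hkle : k + needle.length ≤ text.length := by omega
    rw [dif_pos hkle, if_neg (hmin k le_rfl (by omega))]
    exact ih (k+1) (by omega) (fun i h1 h2 => hmin i (by omega) h2) (by omega)

-- A's find loop = the greedy scan (match_all = true)
theorem rfmFindLoop_eq_scan (text needle : String) (hne : needle ≠ "")
    (fuel k : Nat) (acc : List Int)
    (hk : k ≤ text.toList.length) (hfuel : text.toList.length + 1 - k ≤ fuel) :
    rfmFindLoop text needle true fuel (k : Int) acc
      = acc ++ (rfmScan text.toList needle.toList k).map (fun i => (i : Int)) := by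
  have hne' : needle.toList ≠ [] := by
    intro h; exact hne (by simpa using congrArg String.ofList h)
  have hn : 0 < needle.toList.length := List.length_pos_iff.mpr hne'
  induction fuel generalizing k acc with
  | zero => omega
  | succ fuel ih =>
    rw [rfmFindLoop]
    simp only [PySem.Str.findFrom_eq]
    by_cases hidx : PySem.Chars.findFrom text.toList needle.toList (k : Int) none = -1
    · rw [if_pos hidx]
      rw [rfmScan_nil text.toList needle.toList k
        ((PySem.Chars.findFrom_natCast_eq_neg_one_iff text.toList needle.toList k hk).mp hidx)]
      simp
    · rw [if_neg hidx]
      simp only [if_true]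
      obtain ⟨hge, hpre, hmin⟩ :=
        PySem.Chars.findFrom_natCast_spec text.toList needle.toList k hk hidx
      set idx := PySem.Chars.findFrom text.toList needle.toList (k : Int) none with hidxdef
      have hidx0 : 0 ≤ idx := le_trans (by exact_mod_cast Nat.zero_le k) hge
      have hidxj : idx = (idx.toNat : Int) := by omega
      have hkj : k ≤ idx.toNat := by omega
      have hjlen : idx.toNat + needle.toList.length ≤ text.toList.length := by
        have := hpre.length_le
        simp only [List.length_drop] at this
        omega
      have hlen : (PySem.Str.len needle : Int) = (needle.toList.length : Int) := by
        simp [PySem.Str.len]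
      rw [rfmScan_first text.toList needle.toList hne' k idx.toNat hkj hpre hmin]
      rw [hidxj, hlen, ← Nat.cast_add,
        ih (idx.toNat + needle.toList.length) (acc ++ [(idx.toNat : Int)]) (by omega) (by omega)]
      have hmax : max idx 0 = idx := by omega
      simp [hmax]

-- A's find_matches with match_all=True is the greedy scan from 0
theorem find_matches_true (text needle : String) (hne : needle ≠ "") :
    find_matches text needle true
      = (rfmScan text.toList needle.toList 0).map Int.ofNat := by
  unfold find_matches
  rw [if_neg hne]
  have h := rfmFindLoop_eq_scan text needle hne (text.toList.length + 1) 0 [] (by omega) (by omega)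
  rw [Nat.cast_zero] at h
  simp only [h, List.nil_append]
  induction rfmScan text.toList needle.toList 0 with
  | nil => rfl
  | cons a l ih => simpa [Int.ofNat_eq_natCast] using ih

-- A's find_matches with match_all=False is the first greedy occurrence only
theorem find_matches_false (text needle : String) (hne : needle ≠ "") :
    find_matches text needle false
      = ((rfmScan text.toList needle.toList 0).map Int.ofNat).take 1 := by
  have hne' : needle.toList ≠ [] := by
    intro h; exact hne (by simpa using congrArg String.ofList h)
  unfold find_matches
  rw [if_neg hne, rfmFindLoop]
  simp only [PySem.Str.findFrom_eq, PySem.Chars.findFrom_zero]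
  by_cases hidx : PySem.Chars.find text.toList needle.toList = -1
  · rw [if_pos hidx]
    rw [rfmScan_nil text.toList needle.toList 0
      (by simpa using (PySem.Chars.find_eq_neg_one_iff _ _).mp hidx)]
    simp
  · rw [if_neg hidx]
    have hpos : 0 ≤ PySem.Chars.find text.toList needle.toList := by
      have := PySem.Chars.neg_one_le_find text.toList needle.toList
      omega
    obtain ⟨hpre, hmin⟩ := PySem.Chars.find_spec hpos
    obtain ⟨j, hJ⟩ : ∃ j : Nat, PySem.Chars.find text.toList needle.toList = (j : Int) :=
      ⟨_, (Int.toNat_of_nonneg hpos).symm⟩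
    rw [hJ] at hpre hmin ⊢
    simp only [Int.toNat_natCast] at hpre hmin
    rw [rfmScan_first text.toList needle.toList hne' 0 j (Nat.zero_le _) hpre
      (fun i _ h2 => hmin i h2)]
    simp [Int.ofNat_eq_natCast]

-- B's candidate comprehension computes candN (as Ints)
theorem candidates_eq (text needle : String) :
    (PySem.List.pyRange 0 ((text.toList.length : Int) - (needle.toList.length : Int) + 1) 1).filter
        (fun i => PySem.List.slice text.toList (some i) (some (i + (needle.toList.length : Int))) == needle.toList)
      = (candN text.toList needle.toList).map Int.ofNat := by
  rw [PySem.List.pyRange_one]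
  have hM : ((text.toList.length : Int) - (needle.toList.length : Int) + 1 - 0).toNat
      = text.toList.length + 1 - needle.toList.length := by omega
  have hmap : (fun k : Nat => (0 : Int) + ↑k) = Int.ofNat := by
    funext k; simp [Int.ofNat_eq_natCast]
  rw [hM, hmap, List.filter_map]
  unfold candN
  refine congrArg _ ?_
  apply List.filter_congr
  intro k _
  simp [PySem.List.slice_natCast_add]

-- greedy pick over a sorted complete occurrence list = the greedy scan (match_all = true)
theorem pick_eq_scan (text needle : List Char) (hne : needle ≠ []) :
    ∀ (l : List Nat) (b : Nat), l.Pairwise (· < ·) →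
      (∀ i ∈ l, needle <+: text.drop i) →
      (∀ i, needle <+: text.drop i → b ≤ i → i ∈ l) →
      rfmPick true needle.length (l.map Int.ofNat) (b : Int)
        = (rfmScan text needle b).map Int.ofNat := by
  have hn : 0 < needle.length := List.length_pos_iff.mpr hne
  intro l
  induction l with
  | nil =>
    intro b _ _ hcomp
    rw [rfmScan_nil text needle b]
    · rfl
    · intro hinf
      obtain ⟨i, hbi, hpre⟩ := (infix_drop_iff text needle b).mp hinf
      exact absurd (hcomp i hpre hbi) (List.not_mem_nil)
  | cons a l' ih =>
    intro b hpw hsound hcomp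
    by_cases hba : b ≤ a
    · -- a is the first occurrence ≥ b
      have hocc : needle <+: text.drop a := hsound a (by simp)
      have hmin : ∀ i, b ≤ i → i < a → ¬ needle <+: text.drop i := by
        intro i h1 h2 hp
        have := hcomp i hp h1
        rcases List.mem_cons.mp this with h | h
        · omega
        · have := (List.pairwise_cons.mp hpw).1 i h
          omega
      rw [rfmScan_first text needle hne b a hba hocc hmin, List.map_cons, List.map_cons,
        rfmPick, if_pos (by simp only [Int.ofNat_eq_natCast]; exact_mod_cast hba :
          (Int.ofNat a ≥ (b : Int))), if_pos rfl]
      congr 1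
      have hadd : Int.ofNat a + (needle.length : Int) = ((a + needle.length : Nat) : Int) := by
        simp only [Int.ofNat_eq_natCast]; push_cast; ring
      rw [hadd]
      exact ih (a + needle.length) (List.pairwise_cons.mp hpw).2
        (fun i hi => hsound i (List.mem_cons_of_mem a hi))
        (fun i hp hle => by
          have := hcomp i hp (by omega)
          rcases List.mem_cons.mp this with h | h
          · omega
          · exact h)
    · -- a < b: skipped by the pick, absent from the scan
      rw [List.map_cons, rfmPick,
        if_neg (by simp only [Int.ofNat_eq_natCast]; omega)]
      exact ih b (List.pairwise_cons.mp hpw).2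
        (fun i hi => hsound i (List.mem_cons_of_mem a hi))
        (fun i hp hle => by
          have := hcomp i hp hle
          rcases List.mem_cons.mp this with h | h
          · omega
          · exact h)

-- candN is sorted, sound and complete for occurrences
theorem candN_pairwise (text needle : List Char) : (candN text needle).Pairwise (· < ·) :=
  List.Pairwise.filter _ (List.pairwise_lt_range)

theorem candN_sound (text needle : List Char) :
    ∀ i ∈ candN text needle, needle <+: text.drop i := by
  intro i hi
  have hpred := List.of_mem_filter hi
  have heq : (text.drop i).take needle.length = needle := by
    simpa using hpred
  rw [← heq]
  exact List.take_prefix _ _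


theorem candN_complete (text needle : List Char) (hne : needle ≠ []) :
    ∀ i, needle <+: text.drop i → 0 ≤ i → i ∈ candN text needle := by
  have hn : 0 < needle.length := List.length_pos_iff.mpr hne
  intro i hpre _
  have hlen : needle.length ≤ text.length - i := by
    have := hpre.length_le
    simpa using this
  have hi : i < text.length + 1 - needle.length := by omega
  apply List.mem_filter.mpr
  refine ⟨List.mem_range.mpr hi, ?_⟩
  have : needle = (text.drop i).take needle.length := List.prefix_iff_eq_take.mp hpre
  simp [← this]

-- with match_all=False the pick keeps only the first kept element
theorem pick_false_take (n : Nat) :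
    ∀ (l : List Int) (b : Int), rfmPick false n l b = (rfmPick true n l b).take 1 := by
  intro l
  induction l with
  | nil => intro b; rfl
  | cons i rest ih =>
    intro b
    simp only [rfmPick]
    by_cases h : i ≥ b
    · rw [if_pos h, if_pos h]; rfl
    · rw [if_neg h, if_neg h]; exact ih b

-- A's fold emitting ranges = B's filterMap, over any shared start list
theorem foldl_eq_filterMap (index_map : List Int) (n : Nat) :
    ∀ (l : List Int) (acc : List (List (String × Int))),
      l.foldl (fun results idx =>
        if idx + (n : Int) - 1 ≥ (index_map.length : Int) then results
        else results ++ [[("startIndex", PySem.List.pyGetD index_map idx 0),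
                          ("endIndex", PySem.List.pyGetD index_map (idx + (n : Int) - 1) 0 + 1)]]) acc
      = acc ++ l.filterMap (fun i =>
          if i + (n : Int) - 1 < (index_map.length : Int) then
            some [("startIndex", PySem.List.pyGetD index_map i 0),
                  ("endIndex", PySem.List.pyGetD index_map (i + (n : Int) - 1) 0 + 1)]
          else none) := by
  intro l
  induction l with
  | nil => intro acc; simp
  | cons i rest ih =>
    intro acc
    simp only [List.foldl_cons, List.filterMap_cons]
    by_cases h : i + (n : Int) - 1 < (index_map.length : Int)
    · rw [if_neg (by omega), if_pos h, ih]
      simp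
    · rw [if_pos (by omega), if_neg h, ih]

-- ===== VERDICT (by name: the statement is the Claim_ definition above) =====
theorem ranges_from_match_spec : Claim_equal_ranges_from_match := by
  intro text index_map needle match_all _hdom
  show ranges_from_match text index_map needle match_all
    = ranges_from_match_alt text index_map needle match_all
  unfold ranges_from_match ranges_from_match_alt
  by_cases hne : needle = ""
  · simp [hne, find_matches]
  · rw [if_neg hne]
    have hne' : needle.toList ≠ [] := by
      intro h; exact hne (by simpa using congrArg String.ofList h)
    have hn : 0 < needle.toList.length := List.length_pos_iff.mpr hne'
    have hlen : (PySem.Str.len needle : Int) = (needle.toList.length : Int) := by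
      simp [PySem.Str.len]
    show (find_matches text needle match_all).foldl _ []
      = (rfmPick match_all needle.toList.length
          ((PySem.List.pyRange 0 ((text.toList.length : Int) - (needle.toList.length : Int) + 1) 1).filter
            (fun i => PySem.List.slice text.toList (some i) (some (i + (needle.toList.length : Int))) == needle.toList)) 0).filterMap _
    rw [candidates_eq text needle]
    have hpick : rfmPick true needle.toList.length
        ((candN text.toList needle.toList).map Int.ofNat) 0
        = (rfmScan text.toList needle.toList 0).map Int.ofNat := by
      have := pick_eq_scan text.toList needle.toList hne' (candN text.toList needle.toList) 0
        (candN_pairwise _ _) (candN_sound _ _)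
        (fun i hp h0 => candN_complete text.toList needle.toList hne' i hp h0)
      simpa using this
    cases match_all with
    | true =>
      rw [find_matches_true text needle hne, hpick]
      simp only [hlen]
      exact foldl_eq_filterMap index_map needle.toList.length _ []
    | false =>
      rw [find_matches_false text needle hne, pick_false_take, hpick]
      simp only [hlen]
      exact foldl_eq_filterMap index_map needle.toList.length _ []
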